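-- pv_equiv track=rewrite | github.com/miliar/Code_Jam_Webscraper | solutions_python/solutions_year12_round0_nr2/981.py | solve
-- ===== SOURCE A (Python) =====
-- def zero_or_more(x):
--     if x < 0:
--         return 0
--     return x
--
-- def solve(n, s, p, mx_sc):
--     res = 0
--     for sc in mx_sc:
--         if sc >= p + 2 * zero_or_more(p - 1):
--             res += 1
--             continue
--         if sc >= p + 2 * zero_or_more(p - 2) and s > 0:
--             res += 1
--             s -=1
--             continue
--     return res
-- ===== SOURCE B (Python) =====
-- def solve(n, s, p, mx_sc):
--     high = p + 2 * max(p - 1, 0)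
--     low = p + 2 * max(p - 2, 0)
--     hi = sum(1 for sc in mx_sc if sc >= high)
--     mid = sum(1 for sc in mx_sc if low <= sc < high)
--     return hi + min(max(s, 0), mid)
-- ===== Notes on version B (the rewrite author's own statement) =====
-- stated objective: simpler
-- what changed: Replaces the order-dependent stateful greedy loop (mutating the surprise budget s) with two independent counts (hi = scores reaching the no-surprise threshold, mid = scores reaching only the surprise threshold) and the closed form hi + min(max(s,0), mid). (the counting comprehensions avoid per-element branch/state bookkeeping of the greedy loop)
import Mathlib
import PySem

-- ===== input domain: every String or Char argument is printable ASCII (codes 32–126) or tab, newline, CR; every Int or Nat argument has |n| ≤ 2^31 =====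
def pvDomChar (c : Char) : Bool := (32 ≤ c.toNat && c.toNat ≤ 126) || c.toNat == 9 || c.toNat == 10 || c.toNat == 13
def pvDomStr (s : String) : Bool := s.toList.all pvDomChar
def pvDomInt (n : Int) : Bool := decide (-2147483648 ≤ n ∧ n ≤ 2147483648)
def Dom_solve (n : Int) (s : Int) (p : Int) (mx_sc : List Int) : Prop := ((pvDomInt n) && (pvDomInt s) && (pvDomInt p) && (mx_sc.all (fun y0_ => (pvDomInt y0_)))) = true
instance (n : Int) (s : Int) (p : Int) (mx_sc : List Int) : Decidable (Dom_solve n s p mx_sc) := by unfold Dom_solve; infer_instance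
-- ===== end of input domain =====

-- B replaces A's stateful greedy loop (mutating s) with two independent counts and
-- the closed form hi + min(max(s,0), mid): objective = simpler.

-- ===== PORT A =====
def zero_or_more (x : Int) : Int := if x < 0 then 0 else x

def solve (n : Int) (s : Int) (p : Int) (mx_sc : List Int) : Int :=
  (mx_sc.foldl (fun (st : Int × Int) sc =>
      if sc ≥ p + 2 * zero_or_more (p - 1) then (st.1 + 1, st.2)
      else if sc ≥ p + 2 * zero_or_more (p - 2) ∧ st.2 > 0 then (st.1 + 1, st.2 - 1)
      else (st.1, st.2)) (0, s)).1

-- ===== PORT B =====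
def solve_alt (n : Int) (s : Int) (p : Int) (mx_sc : List Int) : Int :=
  let high := p + 2 * (max (p - 1) 0)
  let low := p + 2 * (max (p - 2) 0)
  let hi : Int := (mx_sc.countP (fun sc => decide (high ≤ sc)) : Nat)
  let mid : Int := (mx_sc.countP (fun sc => decide (low ≤ sc ∧ sc < high)) : Nat)
  hi + min (max s 0) mid

-- ===== PRECONDITION & SPEC =====
def Spec_solve (n : Int) (s : Int) (p : Int) (mx_sc : List Int) (out : Int) : Prop := out = solve_alt n s p mx_sc
instance (n : Int) (s : Int) (p : Int) (mx_sc : List Int) (out : Int) : Decidable (Spec_solve n s p mx_sc out) := by unfold Spec_solve; infer_instance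

-- ===== CLAIM (what is proved, stated in full; the proofs are below) =====
def Claim_equal_solve : Prop := ∀ (n : Int) (s : Int) (p : Int) (mx_sc : List Int), Dom_solve n s p mx_sc → Spec_solve n s p mx_sc (solve n s p mx_sc)

-- ===== LEMMAS AND PROOFS =====

theorem solve_loop_closed (p : Int) (l : List Int) :
    ∀ (res s : Int),
      (l.foldl (fun (st : Int × Int) sc =>
        if sc ≥ p + 2 * zero_or_more (p - 1) then (st.1 + 1, st.2)
        else if sc ≥ p + 2 * zero_or_more (p - 2) ∧ st.2 > 0 then (st.1 + 1, st.2 - 1)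
        else (st.1, st.2)) (res, s)).1
      = res + (l.countP (fun sc => decide (p + 2 * (max (p - 1) 0) ≤ sc)) : Nat)
            + min (max s 0)
              ((l.countP (fun sc => decide (p + 2 * (max (p - 2) 0) ≤ sc ∧ sc < p + 2 * (max (p - 1) 0))) : Nat)) := by
  induction l with
  | nil => intro res s; simp
  | cons sc t ih =>
    intro res s
    have hz1 : zero_or_more (p - 1) = max (p - 1) 0 := by
      simp [zero_or_more]; omega
    have hz2 : zero_or_more (p - 2) = max (p - 2) 0 := by
      simp [zero_or_more]; omega
    simp only [List.foldl_cons, List.countP_cons]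
    split_ifs with h1 h2 <;> rw [ih] <;>
      simp only [hz1, hz2, decide_eq_true_eq, ge_iff_le] at * <;>
      push_cast <;> (try split_ifs) <;> omega

-- ===== VERDICT (by name: the statement is the Claim_ definition above) =====
theorem solve_spec : Claim_equal_solve := by
  intro n s p mx_sc _
  show solve n s p mx_sc = solve_alt n s p mx_sc
  simpa [solve, solve_alt] using solve_loop_closed p mx_sc 0 s
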